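-- pv_equiv track=rewrite | github.com/kkkalmi/algorithm | Full_search/Full_search_1.py | solution
-- ===== SOURCE A (Python) =====
-- def solution(sizes):
--     length = len(sizes)
--     mx = []
--     mn = []
--     for i in range(length):
--         if(sizes[i][0] >= sizes[i][1]):
--             mx.append(sizes[i][0])
--             mn.append(sizes[i][1])
--         else:
--             mx.append(sizes[i][1])
--             mn.append(sizes[i][0])
--
--     mx.sort()
--     mn.sort()
--
--
--     return max(mx) * max(mn)
-- ===== SOURCE B (Python) =====
-- def solution(sizes):
--     big, small = max(sizes[0]), min(sizes[0])
--     for a, b in sizes[1:]: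
--         big = max(big, a, b)
--         small = max(small, min(a, b))
--     return big * small
-- ===== Notes on version B (the rewrite author's own statement) =====
-- stated objective: simpler
-- what changed: Replaces the two appended lists, two sorts and two max() scans by a single pass keeping two scalar running maxima (of max(pair) and min(pair)), seeded from the first pair.
-- outside the precondition, e.g. on solution([]): A raises ValueError, B raises IndexError
import Mathlib
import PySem

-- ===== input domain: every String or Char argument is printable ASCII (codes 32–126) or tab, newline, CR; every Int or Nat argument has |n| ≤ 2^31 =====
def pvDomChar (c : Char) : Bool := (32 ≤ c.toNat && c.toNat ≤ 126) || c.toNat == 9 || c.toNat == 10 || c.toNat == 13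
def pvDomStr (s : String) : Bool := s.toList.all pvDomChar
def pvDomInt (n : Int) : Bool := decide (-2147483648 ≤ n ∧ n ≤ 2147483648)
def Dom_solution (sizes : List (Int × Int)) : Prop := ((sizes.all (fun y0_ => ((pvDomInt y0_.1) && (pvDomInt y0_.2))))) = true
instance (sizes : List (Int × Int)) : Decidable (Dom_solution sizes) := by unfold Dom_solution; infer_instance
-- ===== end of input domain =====

-- B replaces A's two appended lists + two sorts + two max() scans by one pass
-- keeping two scalar running maxima; objective: simpler.

-- ===== PORT A =====
def solution (sizes : List (Int × Int)) : Int :=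
  let length := sizes.length
  let acc := (PySem.List.pyRange 0 (length : Int) 1).foldl
    (fun (acc : List Int × List Int) i =>
      let p := PySem.List.pyGetD sizes i (0, 0)
      if p.1 ≥ p.2 then (acc.1 ++ [p.1], acc.2 ++ [p.2])
      else (acc.1 ++ [p.2], acc.2 ++ [p.1])) ([], [])
  let mx := PySem.List.sorted acc.1 (fun x => x) false
  let mn := PySem.List.sorted acc.2 (fun x => x) false
  -- max(mx) / max(mn): Python raises ValueError on an empty list; Pre_ excludes sizes = []
  (PySem.List.max? mx (fun x => x)).getD 0 * (PySem.List.max? mn (fun x => x)).getD 0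

-- ===== PORT B =====
def solution_alt (sizes : List (Int × Int)) : Int :=
  match sizes with
  | [] => 0  -- sizes[0]: IndexError in Python; outside Pre_
  | p :: _ =>
    let st := (PySem.List.slice sizes (some 1) none).foldl
      (fun (st : Int × Int) q => (max st.1 (max q.1 q.2), max st.2 (min q.1 q.2)))
      (max p.1 p.2, min p.1 p.2)
    st.1 * st.2

-- ===== PRECONDITION & SPEC =====
-- Pre_ excludes only the empty list, on which A raises ValueError (max of empty list).
def Pre_solution (sizes : List (Int × Int)) : Prop := sizes ≠ []
instance (sizes : List (Int × Int)) : Decidable (Pre_solution sizes) := by unfold Pre_solution; infer_instance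
def pvWitness_solution : (List (Int × Int)) := [(3, 5), (2, 2)]

def Spec_solution (sizes : List (Int × Int)) (out : Int) : Prop := out = solution_alt sizes
instance (sizes : List (Int × Int)) (out : Int) : Decidable (Spec_solution sizes out) := by unfold Spec_solution; infer_instance

-- ===== CLAIM (what is proved, stated in full; the proofs are below) =====
def Claim_equal_solution : Prop := ∀ (sizes : List (Int × Int)), Dom_solution sizes → Pre_solution sizes → Spec_solution sizes (solution sizes)

-- ===== LEMMAS AND PROOFS =====

-- A's index loop builds exactly the two mapped lists.
theorem build_maps (sizes : List (Int × Int)) (u v : List Int) :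
    sizes.foldl
      (fun (acc : List Int × List Int) p =>
        if p.1 ≥ p.2 then (acc.1 ++ [p.1], acc.2 ++ [p.2])
        else (acc.1 ++ [p.2], acc.2 ++ [p.1])) (u, v)
      = (u ++ sizes.map (fun p => max p.1 p.2), v ++ sizes.map (fun p => min p.1 p.2)) := by
  induction sizes generalizing u v with
  | nil => simp
  | cons p t ih =>
    simp only [List.foldl_cons, List.map_cons]
    split_ifs with h
    · rw [ih]
      have h1 : max p.1 p.2 = p.1 := max_eq_left h
      have h2 : min p.1 p.2 = p.2 := min_eq_right h
      simp [h1, h2]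
    · rw [ih]
      have h1 : max p.1 p.2 = p.2 := max_eq_right (le_of_not_ge h)
      have h2 : min p.1 p.2 = p.1 := min_eq_left (le_of_not_ge h)
      simp [h1, h2]

-- max() over any permutation of a nonempty list yields the same value.
theorem maxVal_perm (l1 l2 : List Int) (hp : l1.Perm l2) (h : l1 ≠ []) :
    (PySem.List.max? l1 (fun x => x)).getD 0 = (PySem.List.max? l2 (fun x => x)).getD 0 := by
  have h2 : l2 ≠ [] := by intro e; subst e; exact h hp.eq_nil
  obtain ⟨m1, hm1⟩ : ∃ m, PySem.List.max? l1 (fun x => x) = some m := by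
    cases e : PySem.List.max? l1 (fun x => x) with
    | none => exact absurd ((PySem.List.max?_eq_none_iff _ _).mp e) h
    | some m => exact ⟨m, rfl⟩
  obtain ⟨m2, hm2⟩ : ∃ m, PySem.List.max? l2 (fun x => x) = some m := by
    cases e : PySem.List.max? l2 (fun x => x) with
    | none => exact absurd ((PySem.List.max?_eq_none_iff _ _).mp e) h2
    | some m => exact ⟨m, rfl⟩
  rw [hm1, hm2]
  have hmem1 := PySem.List.max?_mem hm1
  have hmem2 := PySem.List.max?_mem hm2
  have hmax1 := PySem.List.max?_isMax hm1
  have hmax2 := PySem.List.max?_isMax hm2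
  simp only [Option.getD_some]
  exact le_antisymm (hmax2 m1 (hp.mem_iff.mp hmem1)) (hmax1 m2 (hp.mem_iff.mpr hmem2))

-- max(sorted(x :: t)) computed as the running max.
theorem maxVal_sorted_cons (x : Int) (t : List Int) :
    (PySem.List.max? (PySem.List.sorted (x :: t) (fun y => y) false) (fun y => y)).getD 0
      = t.foldl max x := by
  rw [maxVal_perm _ (x :: t) (PySem.List.sorted_perm _ _ _) (by
    intro e
    have hp := PySem.List.sorted_perm (x :: t) (fun y => y) false
    rw [e] at hp
    exact List.cons_ne_nil x t hp.symm.eq_nil)]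
  rw [PySem.List.max?_id_cons]
  rfl

-- B's paired fold splits into two scalar folds.
theorem pair_fold_split (l : List (Int × Int)) (a b : Int) :
    l.foldl (fun (st : Int × Int) q => (max st.1 (max q.1 q.2), max st.2 (min q.1 q.2))) (a, b)
      = (l.foldl (fun s q => max s (max q.1 q.2)) a, l.foldl (fun s q => max s (min q.1 q.2)) b) := by
  induction l generalizing a b with
  | nil => rfl
  | cons q t ih => simp [List.foldl_cons, ih]

-- ===== VERDICT (by name: the statement is the Claim_ definition above) =====
theorem solution_spec : Claim_equal_solution := by
  intro sizes _ hpre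
  unfold Spec_solution solution solution_alt
  cases sizes with
  | nil => exact absurd rfl hpre
  | cons p t =>
    simp only []
    rw [PySem.List.foldl_pyRange_zero_pyGetD' (p :: t) (0, 0)
      (fun (acc : List Int × List Int) q =>
        if q.1 ≥ q.2 then (acc.1 ++ [q.1], acc.2 ++ [q.2])
        else (acc.1 ++ [q.2], acc.2 ++ [q.1])) ([], [])]
    rw [build_maps]
    simp only [List.nil_append, List.map_cons]
    rw [maxVal_sorted_cons, maxVal_sorted_cons]
    rw [PySem.List.slice_from_one, pair_fold_split]
    simp only [List.foldl_map]
    rfl
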